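-- pv_equiv track=rewrite | github.com/graphsignal/solver-demo | solutions/1015-C.py | min_songs_to_compress
-- ===== SOURCE A (Python) =====
-- def min_songs_to_compress(n, m, songs):
--     total_original_size = sum(song[0] for song in songs)
--     total_compressed_size = sum(song[1] for song in songs)
--
--     # If even compressed songs can't fit
--     if total_compressed_size > m:
--         return -1
--
--     # If all original songs already fit
--     if total_original_size <= m:
--         return 0
--
--     # Calculate savings
--     savings = [(song[0] - song[1], i) for i, song in enumerate(songs)]
--     # Sort by savings descending
--     savings.sort(reverse=True, key=lambda x: x[0])
--
--     current_size = total_original_size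
--     compress_count = 0
--
--     for saving, i in savings:
--         current_size -= saving
--         compress_count += 1
--         if current_size <= m:
--             return compress_count
--
--     # If we exhaust all possibilities
--     return -1
-- ===== SOURCE B (Python) =====
-- def min_songs_to_compress(n, m, songs):
--     total_compressed_size = sum(c for _, c in songs)
--     if total_compressed_size > m:
--         return -1
--     current_size = sum(o for o, _ in songs)
--     if current_size <= m:
--         return 0
--     savings = [o - c for o, c in songs]
--     compress_count = 0
--     while current_size > m:
--         s = max(savings)
--         savings.remove(s)
--         current_size -= s
--         compress_count += 1
--     return compress_count
-- ===== Notes on version B (the rewrite author's own statement) =====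
-- stated objective: alternative
-- what changed: B drops the enumerate/sort pipeline entirely: instead of sorting all savings descending and scanning the prefix, it lazily selects and removes the current maximum saving each round until the size fits, stopping without ever ordering the rest.
import Mathlib
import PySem

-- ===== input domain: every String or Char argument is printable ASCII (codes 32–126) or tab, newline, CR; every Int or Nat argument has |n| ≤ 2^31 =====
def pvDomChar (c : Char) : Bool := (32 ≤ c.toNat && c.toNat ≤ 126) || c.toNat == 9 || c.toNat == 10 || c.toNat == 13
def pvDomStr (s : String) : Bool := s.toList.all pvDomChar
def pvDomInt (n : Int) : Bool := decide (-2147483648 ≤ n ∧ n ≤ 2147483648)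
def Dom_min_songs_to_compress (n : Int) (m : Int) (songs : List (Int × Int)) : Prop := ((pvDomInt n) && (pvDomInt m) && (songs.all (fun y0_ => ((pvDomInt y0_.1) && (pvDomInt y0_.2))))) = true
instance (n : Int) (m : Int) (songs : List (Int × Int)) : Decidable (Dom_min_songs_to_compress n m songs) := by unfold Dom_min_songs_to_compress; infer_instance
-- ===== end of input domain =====

-- B replaces A's sort-then-scan greedy by lazy repeated max-selection-and-removal (no sort); equivalence proved for all inputs.


-- ===== PORT A =====
-- A's for-loop over the sorted (saving, index) pairs
def pvLoopA (m : Int) (cur cnt : Int) : List (Int × Int) → Int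
  | [] => -1
  | (saving, _) :: rest =>
      if cur - saving ≤ m then cnt + 1 else pvLoopA m (cur - saving) (cnt + 1) rest

def min_songs_to_compress (n : Int) (m : Int) (songs : List (Int × Int)) : Int :=
  let total_original_size := (songs.map (fun song => song.1)).sum
  let total_compressed_size := (songs.map (fun song => song.2)).sum
  if total_compressed_size > m then -1
  else if total_original_size ≤ m then 0
  else
    let savings := (PySem.List.enumerate songs).map (fun p => (p.2.1 - p.2.2, p.1))
    let savingsSorted := PySem.List.sorted savings (fun x => x.1) true
    pvLoopA m total_original_size 0 savingsSorted

-- ===== PORT B =====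
-- B's while-loop: pop the max saving each round.  savings.remove(s) with s = max(savings) ∈ savings
-- is exactly List.erase (first occurrence); max([]) would raise in Python — that branch (-1) is unreachable.
def pvLoopB (m : Int) (cur cnt : Int) (savings : List Int) : Int :=
  if cur ≤ m then cnt
  else
    match h : PySem.List.max? savings (fun x => x) with
    | none => -1
    | some s => pvLoopB m (cur - s) (cnt + 1) (savings.erase s)
termination_by savings.length
decreasing_by
  have hm := PySem.List.max?_mem h
  have := List.length_erase_of_mem hm
  have : savings.length ≠ 0 := by
    intro h0; exact absurd (List.eq_nil_of_length_eq_zero h0 ▸ hm) (List.not_mem_nil)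
  omega

def min_songs_to_compress_alt (n : Int) (m : Int) (songs : List (Int × Int)) : Int :=
  let total_compressed_size := (songs.map (fun s => s.2)).sum
  if total_compressed_size > m then -1
  else
    let current_size := (songs.map (fun s => s.1)).sum
    if current_size ≤ m then 0
    else pvLoopB m current_size 0 (songs.map (fun s => s.1 - s.2))

-- ===== PRECONDITION & SPEC =====
def Spec_min_songs_to_compress (n : Int) (m : Int) (songs : List (Int × Int)) (out : Int) : Prop := out = min_songs_to_compress_alt n m songs
instance (n : Int) (m : Int) (songs : List (Int × Int)) (out : Int) : Decidable (Spec_min_songs_to_compress n m songs out) := by unfold Spec_min_songs_to_compress; infer_instance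

-- ===== CLAIM (what is proved, stated in full; the proofs are below) =====
def Claim_equal_min_songs_to_compress : Prop := ∀ (n : Int) (m : Int) (songs : List (Int × Int)), Dom_min_songs_to_compress n m songs → Spec_min_songs_to_compress n m songs (min_songs_to_compress n m songs)

-- ===== LEMMAS AND PROOFS =====

-- A's loop only reads the saving components
-- scan over plain savings values, same shape as pvLoopA
def pvScan (m : Int) (cur cnt : Int) : List Int → Int
  | [] => -1
  | s :: rest => if cur - s ≤ m then cnt + 1 else pvScan m (cur - s) (cnt + 1) rest

theorem pvLoopA_eq_scan (m : Int) : ∀ (ps : List (Int × Int)) (cur cnt : Int),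
    pvLoopA m cur cnt ps = pvScan m cur cnt (ps.map (fun p => p.1))
  | [], _, _ => rfl
  | (s, i) :: rest, cur, cnt => by
      simp only [pvLoopA, pvScan, List.map_cons]
      split <;> [rfl; exact pvLoopA_eq_scan m rest _ _]

-- core: B's repeated-max loop on any permutation l of a descending-sorted list s agrees with A's scan of s
theorem pvLoopB_eq_scan (m : Int) : ∀ (s : List Int), s.Pairwise (fun a b => b ≤ a) →
    ∀ (l : List Int), l.Perm s → ∀ (cur cnt : Int), m < cur →
    pvLoopB m cur cnt l = pvScan m cur cnt s := by
  intro s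
  induction s with
  | nil =>
      intro _ l hperm cur cnt hcur
      have hl : l = [] := List.Perm.eq_nil hperm
      subst hl
      rw [pvLoopB, if_neg (not_le.mpr hcur)]
      split
      · simp [pvScan]
      · rename_i s hs
        simp [PySem.List.max?] at hs
  | cons x t ih =>
      intro hpw l hperm cur cnt hcur
      have hx : x ∈ l := hperm.mem_iff.mpr (by simp)
      obtain ⟨v, hv⟩ : ∃ v, PySem.List.max? l (fun y => y) = some v := by
        cases l with
        | nil => exact absurd hx (List.not_mem_nil)
        | cons a as => exact ⟨as.foldl max a, PySem.List.max?_id_cons a as⟩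
      have hvmem : v ∈ l := PySem.List.max?_mem hv
      have h1 : x ≤ v := PySem.List.max?_isMax hv x hx
      have h2 : v ≤ x := by
        rcases List.mem_cons.mp (hperm.mem_iff.mp hvmem) with h | h
        · exact le_of_eq h
        · exact (List.pairwise_cons.mp hpw).1 v h
      have hvx : v = x := le_antisymm h2 h1
      subst hvx
      have herase : (l.erase v).Perm t := by
        have h := hperm.erase v
        rwa [List.erase_cons_head] at h
      rw [pvLoopB, if_neg (not_le.mpr hcur)]
      split
      · rename_i hnone
        rw [hv] at hnone; exact absurd hnone (by simp)
      · rename_i s hs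
        rw [hv] at hs
        injection hs with hsv
        subst hsv
        by_cases hfit : cur - v ≤ m
        · rw [pvLoopB, if_pos hfit]
          simp [pvScan, hfit]
        · rw [ih (List.pairwise_cons.mp hpw).2 _ herase _ _ (by omega)]
          simp [pvScan, hfit]

-- the map of fst over A's enumerated savings pairs is the plain savings list B builds
theorem pv_savings_map (songs : List (Int × Int)) :
    ((PySem.List.enumerate songs).map (fun p => (p.2.1 - p.2.2, p.1))).map (fun p => p.1)
      = songs.map (fun s => s.1 - s.2) := by
  have h := PySem.List.map_snd_enumerate (xs := songs) (s := 0)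
  calc ((PySem.List.enumerate songs).map (fun p => (p.2.1 - p.2.2, p.1))).map (fun p => p.1)
      = (PySem.List.enumerate songs).map (fun p => p.2.1 - p.2.2) := by
        rw [List.map_map]; rfl
    _ = ((PySem.List.enumerate songs).map (fun p => p.2)).map (fun s => s.1 - s.2) := by
        rw [List.map_map]; rfl
    _ = songs.map (fun s => s.1 - s.2) := by rw [h]

-- ===== VERDICT (by name: the statement is the Claim_ definition above) =====
theorem min_songs_to_compress_spec : Claim_equal_min_songs_to_compress := by
  intro n m songs _
  unfold Spec_min_songs_to_compress
  simp only [min_songs_to_compress, min_songs_to_compress_alt]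
  split_ifs with h1 h2
  · rfl
  · rfl
  · rw [pvLoopA_eq_scan]
    have hpw : ((PySem.List.sorted ((PySem.List.enumerate songs).map (fun p => (p.2.1 - p.2.2, p.1)))
        (fun x => x.1) true).map (fun p => p.1)).Pairwise (fun a b => b ≤ a) := by
      have := PySem.List.sorted_pairwise_rev (xs := (PySem.List.enumerate songs).map (fun p => (p.2.1 - p.2.2, p.1))) (key := fun x => x.1)
      exact List.pairwise_map.mpr this
    have hperm : (songs.map (fun s => s.1 - s.2)).Perm
        ((PySem.List.sorted ((PySem.List.enumerate songs).map (fun p => (p.2.1 - p.2.2, p.1)))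
          (fun x => x.1) true).map (fun p => p.1)) := by
      have h := (PySem.List.sorted_perm (xs := (PySem.List.enumerate songs).map (fun p => (p.2.1 - p.2.2, p.1))) (key := fun x => x.1) (rev := true)).map (fun p => p.1)
      rw [pv_savings_map] at h
      exact h.symm
    exact (pvLoopB_eq_scan m _ hpw _ hperm _ 0 (by omega)).symm
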